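-- pv_equiv track=rewrite | github.com/edysuardiyana/ga_fs | src/ga_main/training_testing.py | calc_metrics
-- ===== SOURCE A (Python) =====
-- def calc_metrics(prediction_val, class_testing, annot_testing, name):
--     TP = 0
--     FP = 0
--     TN = 0
--     FN = 0
--     Prec = 0
--     Rec = 0
--     Fscore = 0
--     Spec = 0
--     temp_val = []
--     temp_annot = 0
--     for i in range(len(prediction_val)):
--         if not temp_val:
--             temp_annot = annot_testing[i]
--             temp_val.append([prediction_val[i], class_testing[i]])
--         else:
--             if temp_annot == annot_testing[i]:
--                 temp_val.append([prediction_val[i], class_testing[i]])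
--             else:
--                 result = check_metrics(temp_val)
--                 if result == 1:
--                     TP = TP + 1
--                 elif result == 2:
--                     FP = FP + 1
--                 elif result == 3:
--                     TN = TN + 1
--                 else:
--                     FN = FN + 1
--
--                 del temp_val[:]
--                 temp_annot = annot_testing[i]
--                 temp_val.append([prediction_val[i], class_testing[i]])
--
--     if temp_val:
--         result = check_metrics(temp_val)
--         if result == 1:
--             TP = TP+1
--         elif result == 2:
--             FP = FP + 1
--         elif result == 3:
--             TN = TN + 1
--         else:
--             FN = FN + 1
--     return TP, FP, TN, FN
--
-- def check_metrics(data_array):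
--     temp_val = []
--     for i in range(len(data_array)):
--         raw = data_array[i]
--         val = accuracy_check(raw[0], raw[1])
--         temp_val.append(val)
--     final_result = min(temp_val)
--     return final_result
--
-- def accuracy_check(final_detec_flag, annot):
--     result = 0
--     if annot == 1 and final_detec_flag == 1:
--         #true positive
--         result = 1
--     elif annot == 0  and final_detec_flag == 1:
--         #false positive
--         result = 2
--     elif annot == 0 and final_detec_flag == 0:
--         #true negative
--         result = 3
--     else: #in Fall Set and not final_detec_flag
--         #false negative
--         result = 4
--     return result
-- ===== SOURCE B (Python) =====
-- def accuracy_check(final_detec_flag, annot):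
--     result = 0
--     if annot == 1 and final_detec_flag == 1:
--         result = 1
--     elif annot == 0 and final_detec_flag == 1:
--         result = 2
--     elif annot == 0 and final_detec_flag == 0:
--         result = 3
--     else:
--         result = 4
--     return result
--
--
-- def calc_metrics(prediction_val, class_testing, annot_testing, name):
--     n = len(prediction_val)
--     # boundary pass: the indices at which a new consecutive-annotation group begins
--     starts = [i for i in range(n) if i == 0 or annot_testing[i] != annot_testing[i - 1]]
--     counts = [0, 0, 0, 0]  # TP, FP, TN, FN tallied by result code 1..4
--     for s, e in zip(starts, starts[1:] + [n]):
--         result = min(accuracy_check(prediction_val[i], class_testing[i]) for i in range(s, e))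
--         counts[result - 1] += 1
--     return counts[0], counts[1], counts[2], counts[3]
-- ===== Notes on version B (the rewrite author's own statement) =====
-- stated objective: alternative
-- what changed: Replaces A's single-pass temp_val accumulator with flush-on-change and a post-loop flush by a two-phase computation: a comprehension listing the group-boundary indices, then a per-segment min over index ranges tallied into a counts array indexed arithmetically by result code.
import Mathlib
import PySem

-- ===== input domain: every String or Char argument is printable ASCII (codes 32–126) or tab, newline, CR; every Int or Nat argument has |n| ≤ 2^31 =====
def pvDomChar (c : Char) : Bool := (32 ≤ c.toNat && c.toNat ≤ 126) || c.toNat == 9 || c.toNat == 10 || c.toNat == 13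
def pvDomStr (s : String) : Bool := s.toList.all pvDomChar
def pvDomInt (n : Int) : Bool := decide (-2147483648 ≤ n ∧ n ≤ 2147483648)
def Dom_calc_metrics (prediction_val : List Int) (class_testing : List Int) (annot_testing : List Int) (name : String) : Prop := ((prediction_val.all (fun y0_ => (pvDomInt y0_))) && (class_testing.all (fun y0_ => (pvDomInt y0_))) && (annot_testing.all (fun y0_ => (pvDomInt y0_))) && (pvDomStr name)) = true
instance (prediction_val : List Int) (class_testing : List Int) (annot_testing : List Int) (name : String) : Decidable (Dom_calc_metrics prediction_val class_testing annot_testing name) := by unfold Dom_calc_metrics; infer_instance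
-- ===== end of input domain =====

-- B replaces A's running temp_val accumulator (flush on annotation change + post-loop flush) by a
-- two-phase computation: list the group-boundary indices, then tally a per-segment minimum code
-- into a counts array indexed arithmetically; same cost, different decomposition ("alternative").

-- ===== PORT A =====
-- accuracy_check, transliterated
def accuracy_check (final_detec_flag : Int) (annot : Int) : Int :=
  if annot = 1 ∧ final_detec_flag = 1 then 1
  else if annot = 0 ∧ final_detec_flag = 1 then 2
  else if annot = 0 ∧ final_detec_flag = 0 then 3
  else 4

-- check_metrics: build the list of codes by appending, then min (Python min of a list)
def check_metrics (data_array : List (Int × Int)) : Int :=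
  let temp_val := data_array.foldl (fun acc raw => acc ++ [accuracy_check raw.1 raw.2]) []
  (PySem.List.min? temp_val (fun y => y)).getD 0

-- A's if/elif tally of one group's result code (shared shape of the loop's else-branch and the flush)
def bumpA (c : Int × Int × Int × Int) (result : Int) : Int × Int × Int × Int :=
  if result = 1 then (c.1 + 1, c.2.1, c.2.2.1, c.2.2.2)
  else if result = 2 then (c.1, c.2.1 + 1, c.2.2.1, c.2.2.2)
  else if result = 3 then (c.1, c.2.1, c.2.2.1 + 1, c.2.2.2)
  else (c.1, c.2.1, c.2.2.1, c.2.2.2 + 1)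

-- the loop body of A; state = ((TP,FP,TN,FN), temp_val, temp_annot); P i = (prediction_val[i], class_testing[i]), a i = annot_testing[i]
def stepA (P : Nat → Int × Int) (a : Nat → Int)
    (s : (Int × Int × Int × Int) × List (Int × Int) × Int) (i : Nat) :
    (Int × Int × Int × Int) × List (Int × Int) × Int :=
  if s.2.1.isEmpty then (s.1, [P i], a i)
  else if s.2.2 = a i then (s.1, s.2.1 ++ [P i], s.2.2)
  else (bumpA s.1 (check_metrics s.2.1), [P i], a i)

def calc_metrics (prediction_val : List Int) (class_testing : List Int) (annot_testing : List Int) (name : String) : Int × Int × Int × Int :=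
  let st := (List.range prediction_val.length).foldl
    (stepA (fun i => (prediction_val.getD i 0, class_testing.getD i 0)) (fun i => annot_testing.getD i 0))
    ((0, 0, 0, 0), [], 0)
  if st.2.1.isEmpty then st.1 else bumpA st.1 (check_metrics st.2.1)

-- ===== PORT B =====
-- starts = [i for i in range(n) if i == 0 or annot_testing[i] != annot_testing[i-1]]
def bStarts (a : Nat → Int) (n : Nat) : List Nat :=
  (List.range n).filter (fun i => i == 0 || a i != a (i - 1))

-- min(accuracy_check(prediction_val[i], class_testing[i]) for i in range(s, e)); k i = that code
def runMin (k : Nat → Int) (s e : Nat) : Int :=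
  (PySem.List.min? ((List.range' s (e - s)).map k) (fun y => y)).getD 0

-- counts[result - 1] += 1
def bumpL (c : List Int) (r : Int) : List Int := c.modify (r - 1).toNat (· + 1)

-- for s, e in zip(starts, starts[1:] + [n]): counts[min(...) - 1] += 1
def segTally (k : Nat → Int) (starts : List Nat) (n : Nat) : List Int :=
  (starts.zip (starts.drop 1 ++ [n])).foldl (fun c se => bumpL c (runMin k se.1 se.2)) [0, 0, 0, 0]

def calc_metrics_alt (prediction_val : List Int) (class_testing : List Int) (annot_testing : List Int) (name : String) : Int × Int × Int × Int :=
  let n := prediction_val.length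
  let counts := segTally (fun i => accuracy_check (prediction_val.getD i 0) (class_testing.getD i 0))
    (bStarts (fun i => annot_testing.getD i 0) n) n
  (counts.getD 0 0, counts.getD 1 0, counts.getD 2 0, counts.getD 3 0)

-- ===== PRECONDITION & SPEC =====
-- Pre_ excludes exactly the inputs on which Python A raises IndexError: class_testing or
-- annot_testing shorter than prediction_val (A indexes both at every i < len(prediction_val)).
def Pre_calc_metrics (prediction_val : List Int) (class_testing : List Int) (annot_testing : List Int) (name : String) : Prop :=
  prediction_val.length ≤ class_testing.length ∧ prediction_val.length ≤ annot_testing.length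
instance (prediction_val : List Int) (class_testing : List Int) (annot_testing : List Int) (name : String) : Decidable (Pre_calc_metrics prediction_val class_testing annot_testing name) := by unfold Pre_calc_metrics; infer_instance

def pvWitness_calc_metrics : List Int × List Int × List Int × String := ([1, 0, 1, 0], [1, 0, 0, 1], [5, 5, 7, 7], "run")

def Spec_calc_metrics (prediction_val : List Int) (class_testing : List Int) (annot_testing : List Int) (name : String) (out : Int × Int × Int × Int) : Prop := out = calc_metrics_alt prediction_val class_testing annot_testing name
instance (prediction_val : List Int) (class_testing : List Int) (annot_testing : List Int) (name : String) (out : Int × Int × Int × Int) : Decidable (Spec_calc_metrics prediction_val class_testing annot_testing name out) := by unfold Spec_calc_metrics; infer_instance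

-- ===== CLAIM (what is proved, stated in full; the proofs are below) =====
def Claim_equal_calc_metrics : Prop := ∀ (prediction_val : List Int) (class_testing : List Int) (annot_testing : List Int) (name : String), Dom_calc_metrics prediction_val class_testing annot_testing name → Pre_calc_metrics prediction_val class_testing annot_testing name → Spec_calc_metrics prediction_val class_testing annot_testing name (calc_metrics prediction_val class_testing annot_testing name)

-- ===== LEMMAS AND PROOFS =====

-- abstract state machine both ports are shown equal to: counts + current run as (min code, annot)
def specF (k a : Nat → Int) : Nat → (Int × Int × Int × Int) × Option (Int × Int)
  | 0 => ((0, 0, 0, 0), none)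
  | n + 1 =>
    let s := specF k a n
    match s.2 with
    | none => (s.1, some (k n, a n))
    | some (m, ta) => if ta = a n then (s.1, some (min m (k n), ta)) else (bumpA s.1 m, some (k n, a n))

def flushS : (Int × Int × Int × Int) × Option (Int × Int) → Int × Int × Int × Int
  | (c, none) => c
  | (c, some (m, _)) => bumpA c m

def absA (s : (Int × Int × Int × Int) × List (Int × Int) × Int) : (Int × Int × Int × Int) × Option (Int × Int) :=
  (s.1, if s.2.1.isEmpty then none else some (check_metrics s.2.1, s.2.2))

def toQuad (c : List Int) : Int × Int × Int × Int := (c.getD 0 0, c.getD 1 0, c.getD 2 0, c.getD 3 0)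

theorem min_getD_append (l : List Int) (y d : Int) (h : l ≠ []) :
    (PySem.List.min? (l ++ [y]) (fun v => v)).getD d = min ((PySem.List.min? l (fun v => v)).getD d) y := by
  obtain ⟨x, t, rfl⟩ := List.exists_cons_of_ne_nil h
  simp [PySem.List.min?_id_cons, List.foldl_append]

theorem check_metrics_eq_min (l : List (Int × Int)) :
    check_metrics l = (PySem.List.min? (l.map (fun p => accuracy_check p.1 p.2)) (fun y => y)).getD 0 := by
  simp only [check_metrics, PySem.List.foldl_append_singleton_eq_map, List.nil_append]

theorem check_single (x : Int × Int) : check_metrics [x] = accuracy_check x.1 x.2 := by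
  simp [check_metrics_eq_min, PySem.List.min?_id_cons]

theorem check_append (l : List (Int × Int)) (x : Int × Int) (h : l ≠ []) :
    check_metrics (l ++ [x]) = min (check_metrics l) (accuracy_check x.1 x.2) := by
  simp only [check_metrics_eq_min, List.map_append, List.map_cons, List.map_nil]
  exact min_getD_append _ _ _ (by simpa using h)

theorem A_fold (P : Nat → Int × Int) (a : Nat → Int) (n : Nat) :
    absA ((List.range n).foldl (stepA P a) ((0, 0, 0, 0), [], 0))
      = specF (fun i => accuracy_check (P i).1 (P i).2) a n := by
  induction n with
  | zero => simp [specF, absA]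
  | succ n ih =>
    rw [List.range_succ, List.foldl_append, List.foldl_cons, List.foldl_nil]
    rw [specF, ← ih]
    set st := (List.range n).foldl (stepA P a) ((0, 0, 0, 0), [], 0) with hst
    by_cases hE : st.2.1.isEmpty
    · simp [stepA, absA, hE, check_single]
    · by_cases hT : st.2.2 = a n
      · simp [stepA, absA, hE, hT, check_append st.2.1 (P n) (by simpa using hE)]
      · simp [stepA, absA, hE, hT, check_single]

theorem acc_bounds (f a : Int) : 1 ≤ accuracy_check f a ∧ accuracy_check f a ≤ 4 := by
  unfold accuracy_check; split_ifs <;> omega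

theorem zipSeg (l : List Nat) (x e : Nat) :
    (l ++ [x]).zip (((l ++ [x]).drop 1) ++ [e]) = l.zip ((l.drop 1) ++ [x]) ++ [(x, e)] := by
  induction l with
  | nil => simp
  | cons y ys ih =>
    cases ys with
    | nil => simp
    | cons z zs =>
      simp only [List.cons_append, List.drop_succ_cons, List.drop_zero,
        List.append_assoc, List.nil_append, List.zip_cons_cons] at ih ⊢
      simp [ih]

theorem bumpFold_length (k : Nat → Int) (segs : List (Nat × Nat)) :
    ∀ c : List Int, (segs.foldl (fun c se => bumpL c (runMin k se.1 se.2)) c).length = c.length := by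
  induction segs with
  | nil => intro c; rfl
  | cons se t ih => intro c; rw [List.foldl_cons, ih]; simp [bumpL]

theorem toQuad_bumpL (c : List Int) (hc : c.length = 4) (r : Int) (h1 : 1 ≤ r) (h4 : r ≤ 4) :
    toQuad (bumpL c r) = bumpA (toQuad c) r := by
  match c, hc with
  | [c0, c1, c2, c3], _ =>
    interval_cases r <;> rfl

theorem runMin_single (k : Nat → Int) (s : Nat) : runMin k s (s + 1) = k s := by
  simp [runMin, PySem.List.min?_id_cons]

theorem runMin_succ (k : Nat → Int) (s n : Nat) (h : s < n) :
    runMin k s (n + 1) = min (runMin k s n) (k n) := by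
  have h1 : n + 1 - s = (n - s) + 1 := by omega
  have h2 : s + (n - s) = n := by omega
  rw [runMin, h1, List.range'_1_concat, h2, List.map_append, List.map_cons, List.map_nil]
  rw [min_getD_append _ _ _ (by simp [List.range'_eq_nil_iff]; omega)]
  rfl

theorem runMin_bounds (k : Nat → Int) (hk : ∀ i, 1 ≤ k i ∧ k i ≤ 4) (s e : Nat) (h : s < e) :
    1 ≤ runMin k s e ∧ runMin k s e ≤ 4 := by
  have hne : (List.range' s (e - s)).map k ≠ [] := by
    simp [List.range'_eq_nil_iff]; omega
  rcases hm : PySem.List.min? ((List.range' s (e - s)).map k) (fun y => y) with _ | m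
  · exact absurd ((PySem.List.min?_eq_none_iff _ _).1 hm) hne
  · have hmem := PySem.List.min?_mem hm
    obtain ⟨i, _, rfl⟩ := List.mem_map.1 hmem
    simpa [runMin, hm] using hk i

theorem segTally_snoc (k : Nat → Int) (hk : ∀ i, 1 ≤ k i ∧ k i ≤ 4) (st : List Nat) (s n : Nat) (hs : s < n) :
    toQuad (segTally k (st ++ [s]) n) = bumpA (toQuad (segTally k st s)) (runMin k s n) := by
  unfold segTally
  rw [zipSeg, List.foldl_append, List.foldl_cons, List.foldl_nil]
  exact toQuad_bumpL _ (by rw [bumpFold_length]; rfl) _ (runMin_bounds k hk s n hs).1 (runMin_bounds k hk s n hs).2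

theorem bStarts_succ (a : Nat → Int) (n : Nat) :
    bStarts a (n + 1) = bStarts a n ++ (if n = 0 ∨ a n ≠ a (n - 1) then [n] else []) := by
  by_cases hn : n = 0 <;> by_cases ha : a n = a (n - 1) <;>
    simp [bStarts, List.range_succ, hn, ha]

theorem B_inv (k a : Nat → Int) (hk : ∀ i, 1 ≤ k i ∧ k i ≤ 4) :
    ∀ n, 0 < n → ∃ st' s, bStarts a (n) = st' ++ [s] ∧ s < n ∧
      specF k a n = (toQuad (segTally k st' s), some (runMin k s n, a (n - 1))) := by
  intro n
  induction n with
  | zero => intro h; exact absurd h (lt_irrefl 0)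
  | succ n ih =>
    intro _
    by_cases hn : n = 0
    · subst hn
      refine ⟨[], 0, ?_, Nat.zero_lt_one, ?_⟩
      · simp [bStarts]
      · simp [specF, segTally, toQuad, runMin_single]
    · obtain ⟨st', s, hst, hsn, hspec⟩ := ih (by omega)
      by_cases ha : a n = a (n - 1)
      · refine ⟨st', s, ?_, by omega, ?_⟩
        · rw [bStarts_succ, hst]; simp [hn, ha]
        · have hstep : specF k a (n + 1)
              = (toQuad (segTally k st' s), some (min (runMin k s n) (k n), a (n - 1))) := by
            simp only [specF, hspec]
            simp [ha.symm]
          rw [hstep, ← runMin_succ k s n hsn]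
          simp [ha]
      · refine ⟨st' ++ [s], n, ?_, by omega, ?_⟩
        · rw [bStarts_succ, hst]; simp [ha]
        · have hstep : specF k a (n + 1)
              = (bumpA (toQuad (segTally k st' s)) (runMin k s n), some (k n, a n)) := by
            simp only [specF, hspec]
            have ha' : ¬ a (n - 1) = a n := fun h => ha h.symm
            simp [ha']
          rw [hstep, segTally_snoc k hk st' s n hsn, runMin_single]
          simp

theorem mainEq (k a : Nat → Int) (hk : ∀ i, 1 ≤ k i ∧ k i ≤ 4) (n : Nat) :
    flushS (specF k a n) = toQuad (segTally k (bStarts a n) n) := by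
  cases n with
  | zero => simp [specF, flushS, bStarts, segTally, toQuad]
  | succ n =>
    obtain ⟨st', s, hst, hsn, hspec⟩ := B_inv k a hk (n + 1) (Nat.succ_pos n)
    rw [hspec, hst, segTally_snoc k hk st' s (n + 1) hsn]
    rfl

-- ===== VERDICT (by name: the statement is the Claim_ definition above) =====
theorem calc_metrics_spec : Claim_equal_calc_metrics := by
  intro pv ct an nm _ _
  unfold Spec_calc_metrics calc_metrics calc_metrics_alt
  have flush_abs : ∀ s : (Int × Int × Int × Int) × List (Int × Int) × Int,
      (if s.2.1.isEmpty then s.1 else bumpA s.1 (check_metrics s.2.1)) = flushS (absA s) := by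
    intro s; by_cases h : s.2.1.isEmpty <;> simp [absA, flushS, h]
  rw [flush_abs, A_fold (fun i => (pv.getD i 0, ct.getD i 0)) (fun i => an.getD i 0) pv.length]
  rw [mainEq _ _ (fun i => acc_bounds _ _) pv.length]
  rfl
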